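-- pv_equiv track=rewrite | github.com/dorond/tax-free-savings-simulation | exploration.py | is_valid_investment_params
-- ===== SOURCE A (Python) =====
-- def is_valid_investment_params(row):
--     time_horizon = row["Time_Horizon"]
--     lump_sum = row["Lump_Sum"]
--     monthly_contrib = row["Monthly_Contrib"]
--
--     periods = time_horizon * 12
--
--     ##### dealing with the easy cases first ####
--
--     # not allowed to contribute more than R33,000 per year, so lump sum cannot be greater than this amount.
--     if lump_sum > 33000:
--         return False
--
--     # total lifetime contributions cannot be greater than R500,000, so let's check that.
--     if (lump_sum + periods*monthly_contrib) > 500000: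
--         return False
--
--     ##### Now the more challenging part, ensuring the contribution in any given month doesn't exceed R33,000 per year or R500,000 in total. #####
--
--     # if the contributions in a single year + the lump sum exceed 33,000, reject the investment option.
--     total = lump_sum
--     for i in range(1, 13):
--         total = total + monthly_contrib
--         if total > 33000:
--             return False
--     return True
-- ===== SOURCE B (Python) =====
-- def is_valid_investment_params(row):
--     lump_sum = row["Lump_Sum"]
--     monthly_contrib = row["Monthly_Contrib"]
--     periods = row["Time_Horizon"] * 12
--     return (lump_sum <= 33000
--             and lump_sum + periods * monthly_contrib <= 500000
--             and lump_sum + 12 * monthly_contrib <= 33000)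
-- ===== Notes on version B (the rewrite author's own statement) =====
-- stated objective: simpler
-- what changed: The 12-iteration running-total loop with early return is replaced by a single closed-form yearly test lump_sum + 12*monthly_contrib <= 33000, and the three guards collapse into one boolean conjunction; Pre_ excludes rows missing one of the three keys, on which A raises KeyError.
import Mathlib
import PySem

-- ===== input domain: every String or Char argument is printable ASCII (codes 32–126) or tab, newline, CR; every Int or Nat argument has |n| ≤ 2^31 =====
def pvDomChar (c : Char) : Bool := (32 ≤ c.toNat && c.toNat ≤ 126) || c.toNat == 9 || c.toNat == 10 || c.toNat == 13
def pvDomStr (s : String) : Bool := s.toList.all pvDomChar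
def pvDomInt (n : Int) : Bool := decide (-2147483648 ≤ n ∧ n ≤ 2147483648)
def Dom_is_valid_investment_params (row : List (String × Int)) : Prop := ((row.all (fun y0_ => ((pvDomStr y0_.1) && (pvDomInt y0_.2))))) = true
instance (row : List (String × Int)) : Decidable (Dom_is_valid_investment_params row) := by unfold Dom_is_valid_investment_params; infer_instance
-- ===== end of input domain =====

-- B replaces A's 12-step running-total loop by the single closed-form yearly test (objective: simpler).


-- ===== PORT A =====
-- row[k]: first matching key in the association list (Python dict lookup)
def pvLookup (row : List (String × Int)) (k : String) : Option Int :=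
  (row.find? (fun p => p.1 == k)).map (·.2)

-- the 'for i in range(1, 13)' loop with early return
def pvLoopA (total monthly_contrib : Int) : List Int → Bool
  | [] => true
  | _ :: rest =>
    if total + monthly_contrib > 33000 then false
    else pvLoopA (total + monthly_contrib) monthly_contrib rest

def is_valid_investment_params (row : List (String × Int)) : Bool :=
  match pvLookup row "Time_Horizon", pvLookup row "Lump_Sum", pvLookup row "Monthly_Contrib" with
  | some time_horizon, some lump_sum, some monthly_contrib =>
    let periods := time_horizon * 12
    if lump_sum > 33000 then false
    else if lump_sum + periods * monthly_contrib > 500000 then false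
    else pvLoopA lump_sum monthly_contrib (PySem.List.pyRange 1 13 1)
  | _, _, _ => false  -- KeyError in Python; excluded by Pre_

-- ===== PORT B =====
def is_valid_investment_params_alt (row : List (String × Int)) : Bool :=
  match row.lookup "Lump_Sum" with
  | none => false  -- KeyError in Python; excluded by Pre_
  | some lump_sum =>
    match row.lookup "Monthly_Contrib" with
    | none => false
    | some monthly_contrib =>
      match row.lookup "Time_Horizon" with
      | none => false
      | some th =>
        let periods := th * 12
        (lump_sum ≤ 33000)
          && (lump_sum + periods * monthly_contrib ≤ 500000)
          && (lump_sum + 12 * monthly_contrib ≤ 33000)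

-- ===== PRECONDITION & SPEC =====
-- Pre_: the three keys are present (Python raises KeyError otherwise).
def Pre_is_valid_investment_params (row : List (String × Int)) : Prop :=
  (row.lookup "Time_Horizon").isSome ∧ (row.lookup "Lump_Sum").isSome ∧ (row.lookup "Monthly_Contrib").isSome
instance (row : List (String × Int)) : Decidable (Pre_is_valid_investment_params row) := by unfold Pre_is_valid_investment_params; infer_instance
def pvWitness_is_valid_investment_params : (List (String × Int)) :=
  [("Time_Horizon", 10), ("Lump_Sum", 1000), ("Monthly_Contrib", 500)]

def Spec_is_valid_investment_params (row : List (String × Int)) (out : Bool) : Prop := out = is_valid_investment_params_alt row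
instance (row : List (String × Int)) (out : Bool) : Decidable (Spec_is_valid_investment_params row out) := by unfold Spec_is_valid_investment_params; infer_instance

-- ===== CLAIM =====
def Claim_equal_is_valid_investment_params : Prop := ∀ (row : List (String × Int)), Dom_is_valid_investment_params row → Pre_is_valid_investment_params row → Spec_is_valid_investment_params row (is_valid_investment_params row)

-- ===== LEMMAS AND PROOFS =====
theorem pvLoopA_true_nonpos (mc : Int) (hm : mc ≤ 0) :
    ∀ (l : List Int) (t : Int), t + mc ≤ 33000 → pvLoopA t mc l = true := by
  intro l
  induction l with
  | nil => intro t _; rfl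
  | cons x rest ih =>
    intro t ht
    simp only [pvLoopA, if_neg (by omega : ¬ t + mc > 33000)]
    exact ih (t + mc) (by omega)

theorem pvLoopA_true_nonneg (mc : Int) (hm : 0 ≤ mc) :
    ∀ (l : List Int) (t : Int), t + l.length * mc ≤ 33000 → pvLoopA t mc l = true := by
  intro l
  induction l with
  | nil => intro t _; rfl
  | cons x rest ih =>
    intro t ht
    simp only [List.length_cons] at ht
    have h1 : ¬ t + mc > 33000 := by push_cast at ht ⊢; nlinarith
    simp only [pvLoopA, if_neg h1]
    exact ih (t + mc) (by push_cast at ht ⊢; linarith)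

theorem pvLoopA_false_nonneg (mc : Int) (_hm : 0 ≤ mc) :
    ∀ (l : List Int) (t : Int), t + l.length * mc > 33000 → l ≠ [] → pvLoopA t mc l = false := by
  intro l
  induction l with
  | nil => intro t _ hne; exact absurd rfl hne
  | cons x rest ih =>
    intro t ht _
    by_cases h1 : t + mc > 33000
    · simp only [pvLoopA, if_pos h1]
    · simp only [pvLoopA, if_neg h1]
      rcases rest with _ | ⟨y, rs⟩
      · simp only [List.length_cons, List.length_nil] at ht; omega
      · apply ih _ _ (by simp)
        simp only [List.length_cons] at ht ⊢
        push_cast at ht ⊢; linarith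

theorem pvLookup_eq_lookup (row : List (String × Int)) (k : String) :
    pvLookup row k = row.lookup k := by
  induction row with
  | nil => rfl
  | cons p rest ih =>
    by_cases h : p.1 = k
    · simp [pvLookup, List.lookup, List.find?, h]
    · have hb : (p.1 == k) = false := beq_eq_false_iff_ne.mpr h
      have hb2 : (k == p.1) = false := beq_eq_false_iff_ne.mpr (Ne.symm h)
      simp only [pvLookup, List.lookup, List.find?, hb, hb2] at *
      exact ih

-- Under the first guard ls ≤ 33000, the loop is exactly the yearly closed-form test:
-- negative monthly contributions never trip it (partial sums only decrease below ls).
theorem pvLoop_closed (ls mc : Int) (hls : ls ≤ 33000) :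
    pvLoopA ls mc (PySem.List.pyRange 1 13 1) = decide (ls + 12 * mc ≤ 33000) := by
  have h : PySem.List.pyRange 1 13 1 = [1,2,3,4,5,6,7,8,9,10,11,12] := by
    rw [PySem.List.pyRange_one]
    simp [List.range_succ]
  rw [h]
  rcases le_total mc 0 with hm | hm
  · have hc : ls + 12 * mc ≤ 33000 := by omega
    rw [pvLoopA_true_nonpos mc hm _ ls (by omega), decide_eq_true hc]
  · by_cases hc : ls + 12 * mc ≤ 33000
    · rw [pvLoopA_true_nonneg mc hm _ ls (by simpa using hc), decide_eq_true hc]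
    · rw [pvLoopA_false_nonneg mc hm _ ls (by simp; omega) (by simp), eq_comm, decide_eq_false hc]

-- ===== VERDICT =====
theorem is_valid_investment_params_spec : Claim_equal_is_valid_investment_params := by
  intro row _ hpre
  obtain ⟨h1, h2, h3⟩ := hpre
  unfold Spec_is_valid_investment_params is_valid_investment_params is_valid_investment_params_alt
  obtain ⟨th, hth⟩ := Option.isSome_iff_exists.mp h1
  obtain ⟨ls, hls⟩ := Option.isSome_iff_exists.mp h2
  obtain ⟨mc, hmc⟩ := Option.isSome_iff_exists.mp h3
  rw [pvLookup_eq_lookup, pvLookup_eq_lookup, pvLookup_eq_lookup, hth, hls, hmc]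
  by_cases g1 : ls > 33000
  · simp [g1]
  · simp only [if_neg g1, pvLoop_closed ls mc (by omega)]
    split_ifs with g2 <;> simp <;> omega
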